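-- pv_equiv track=rewrite | github.com/jdarov/PY_110 | STUDY_GUIDE/Problem8.py | all_vowel_substrings
-- ===== SOURCE A (Python) =====
-- VOWELS = 'aeiou'
--
-- def all_vowel_substrings(string):
--     vowel_string = ''
--     list_of_vowel_strings = list()
--
--     for x in range(len(string)):
--         if string[x] in VOWELS:
--             vowel_string += string[x]
--             for y in range(x+1, len(string)):
--                 if string[y] in VOWELS:
--                     vowel_string += string[y]
--                     continue
--                 break
--             list_of_vowel_strings.append(vowel_string)
--             vowel_string = ''
--
--     return list_of_vowel_strings
-- ===== SOURCE B (Python) =====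
-- def all_vowel_substrings(string):
--     # Segment the string once into maximal vowel runs, then emit each run's
--     # suffixes longest-first; no per-position rescanning.
--     result = []
--     i = 0
--     n = len(string)
--     while i < n:
--         if string[i] in 'aeiou':
--             j = i
--             while j < n and string[j] in 'aeiou':
--                 j += 1
--             run = string[i:j]
--             for k in range(len(run)):
--                 result.append(run[k:])
--             i = j
--         else:
--             i += 1
--     return result
-- ===== Notes on version B (the rewrite author's own statement) =====
-- stated objective: alternative
-- what changed: B segments the string once into maximal vowel runs and emits each run's suffixes by slicing, instead of A's per-position forward rescan of the vowels ahead; it trades the rescan for a grouping pass of similar measured cost.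
import Mathlib
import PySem

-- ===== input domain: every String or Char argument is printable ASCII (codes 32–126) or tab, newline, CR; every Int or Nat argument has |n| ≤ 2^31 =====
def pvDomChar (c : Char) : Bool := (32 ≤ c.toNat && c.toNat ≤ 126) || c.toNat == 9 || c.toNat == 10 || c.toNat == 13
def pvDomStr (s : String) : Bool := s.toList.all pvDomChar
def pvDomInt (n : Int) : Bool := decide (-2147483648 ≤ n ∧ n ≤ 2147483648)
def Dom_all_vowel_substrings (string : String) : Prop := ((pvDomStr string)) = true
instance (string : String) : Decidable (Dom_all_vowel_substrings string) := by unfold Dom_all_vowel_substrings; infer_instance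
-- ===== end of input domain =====

-- B segments the string once into maximal vowel runs and slices out each run's
-- suffixes, instead of A's per-position forward rescan (objective: alternative decomposition).

def pvIsVowel (c : Char) : Bool := c = 'a' || c = 'e' || c = 'i' || c = 'o' || c = 'u'

-- ===== PORT A =====
-- inner 'for y … break' loop of A: extend vowel_string while vowels continue
def pvAInner : List Char → List Char → List Char
  | [], acc => acc
  | c :: rest, acc => if pvIsVowel c then pvAInner rest (acc ++ [c]) else acc

-- outer 'for x in range(len(string))' loop of A
def pvAOuter : List Char → List String
  | [] => []
  | c :: rest =>
    if pvIsVowel c then String.ofList (pvAInner rest [c]) :: pvAOuter rest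
    else pvAOuter rest

def all_vowel_substrings (string : String) : List String := pvAOuter string.toList

-- ===== PORT B =====
-- suffixes of one run, longest first (the 'for k in range(len(run))' loop)
def pvSuffixes (r : List Char) : List String :=
  (List.range r.length).map (fun k => String.ofList (r.drop k))

-- segmentation into maximal vowel runs (the outer while loop with the j-scan)
def pvRuns : List Char → List (List Char)
  | [] => []
  | c :: rest =>
    if pvIsVowel c then (c :: rest.takeWhile pvIsVowel) :: pvRuns (rest.dropWhile pvIsVowel)
    else pvRuns rest
  termination_by t => t.length
  decreasing_by
    · simpa using Nat.lt_succ_of_le (List.length_dropWhile_le ..)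
    · simp

def all_vowel_substrings_alt (string : String) : List String :=
  (pvRuns string.toList).flatMap pvSuffixes

-- ===== PRECONDITION & SPEC =====
def Spec_all_vowel_substrings (string : String) (out : List String) : Prop := out = all_vowel_substrings_alt string
instance (string : String) (out : List String) : Decidable (Spec_all_vowel_substrings string out) := by unfold Spec_all_vowel_substrings; infer_instance

-- ===== CLAIM (what is proved, stated in full; the proofs are below) =====
def Claim_equal_all_vowel_substrings : Prop := ∀ (string : String), Dom_all_vowel_substrings string → Spec_all_vowel_substrings string (all_vowel_substrings string)

-- ===== LEMMAS AND PROOFS =====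

theorem pvAInner_eq (t : List Char) : ∀ acc, pvAInner t acc = acc ++ t.takeWhile pvIsVowel := by
  induction t with
  | nil => simp [pvAInner]
  | cons c rest ih =>
    intro acc
    by_cases h : pvIsVowel c = true <;> simp [pvAInner, h, ih]

theorem pvSuffixes_cons (c : Char) (r : List Char) :
    pvSuffixes (c :: r) = String.ofList (c :: r) :: pvSuffixes r := by
  simp [pvSuffixes, List.range_succ_eq_map, List.map_map, Function.comp_def]

-- A's outer loop factors through the leading vowel run
theorem pvAOuter_split (t : List Char) :
    pvAOuter t = pvSuffixes (t.takeWhile pvIsVowel) ++ pvAOuter (t.dropWhile pvIsVowel) := by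
  induction t with
  | nil => simp [pvAOuter, pvSuffixes]
  | cons c rest ih =>
    by_cases h : pvIsVowel c = true
    · simp [pvAOuter, h, pvAInner_eq, pvSuffixes_cons, ih]
    · simp [pvAOuter, h, pvSuffixes]

theorem pvMain : ∀ n (t : List Char), t.length ≤ n →
    pvAOuter t = (pvRuns t).flatMap pvSuffixes := by
  intro n
  induction n with
  | zero =>
    intro t ht
    have : t = [] := List.eq_nil_of_length_eq_zero (Nat.le_zero.mp ht)
    simp [this, pvAOuter, pvRuns]
  | succ n ih =>
    intro t ht
    match t with
    | [] => simp [pvAOuter, pvRuns]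
    | c :: rest =>
      by_cases h : pvIsVowel c = true
      · have hlen : (rest.dropWhile pvIsVowel).length ≤ n :=
          le_trans (List.length_dropWhile_le ..) (Nat.lt_succ_iff.mp (Nat.lt_of_lt_of_le (by simp) ht))
        simp only [pvAOuter, h, if_pos, pvRuns, List.flatMap_cons]
        rw [pvAInner_eq, pvAOuter_split rest, ih _ hlen]
        simp [pvSuffixes_cons]
      · have hlen : rest.length ≤ n := Nat.lt_succ_iff.mp (Nat.lt_of_lt_of_le (by simp) ht)
        simp only [pvAOuter, pvRuns, h, if_neg, Bool.false_eq_true, not_false_iff]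
        exact ih rest hlen

-- ===== VERDICT (by name: the statement is the Claim_ definition above) =====
theorem all_vowel_substrings_spec : Claim_equal_all_vowel_substrings := by
  intro s _
  unfold Spec_all_vowel_substrings all_vowel_substrings all_vowel_substrings_alt
  exact pvMain s.toList.length s.toList le_rfl
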